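-- pv_equiv track=rewrite | github.com/Jickx/yandex-internship | algorithms_training_2021/lesson_2/h_max_triple_product.py | find_max_triple_product
-- ===== SOURCE A (Python) =====
-- def find_max_triple_product(arr: list[int]) -> tuple:
--     max_num = max(arr[:3])
--     max_num3 = min(arr[:3])
--     max_num2 = sum(arr[:3]) - max_num3 - max_num
--     for i in range(3, len(arr)):
--         if arr[i] > max_num3:
--             if arr[i] > max_num2:
--                 if arr[i] > max_num:
--                     max_num3, max_num2, max_num = max_num2, max_num, arr[i]
--                 else:
--                     max_num3, max_num2 = max_num2, arr[i]
--             else: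
--                 max_num3 = arr[i]
--
--     min_num = min(arr[0:2])
--     min_num_2 = max(arr[0:2])
--     for i in range(2, len(arr)):
--         if arr[i] < min_num_2:
--             if arr[i] < min_num:
--                 min_num_2 = min_num
--                 min_num = arr[i]
--             else:
--                 min_num_2 = arr[i]
--     return (max_num, max_num2, max_num3) if max_num * max_num2 * max_num3 > min_num * min_num_2 * max_num else (
--         max_num, min_num_2, min_num)
-- ===== SOURCE B (Python) =====
-- def find_max_triple_product(arr: list[int]) -> tuple:
--     s = sorted(arr)
--     if s[-1] * s[-2] * s[-3] > s[0] * s[1] * s[-1]: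
--         return (s[-1], s[-2], s[-3])
--     return (s[-1], s[1], s[0])
-- ===== Notes on version B (the rewrite author's own statement) =====
-- stated objective: simpler
-- what changed: B replaces A's two running-selection passes (a 3-state maximum scan and a 2-state minimum scan with hand-maintained shifting) by one sorted() call and direct indexing of the two candidate triples.
-- outside the precondition, e.g. on find_max_triple_product([]): A raises ValueError, B raises IndexError; on find_max_triple_product([5]): A returns (5, 5, 5), B raises IndexError; on find_max_triple_product([5, 2]): A returns (5, 5, 2), B raises IndexError
import Mathlib
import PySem

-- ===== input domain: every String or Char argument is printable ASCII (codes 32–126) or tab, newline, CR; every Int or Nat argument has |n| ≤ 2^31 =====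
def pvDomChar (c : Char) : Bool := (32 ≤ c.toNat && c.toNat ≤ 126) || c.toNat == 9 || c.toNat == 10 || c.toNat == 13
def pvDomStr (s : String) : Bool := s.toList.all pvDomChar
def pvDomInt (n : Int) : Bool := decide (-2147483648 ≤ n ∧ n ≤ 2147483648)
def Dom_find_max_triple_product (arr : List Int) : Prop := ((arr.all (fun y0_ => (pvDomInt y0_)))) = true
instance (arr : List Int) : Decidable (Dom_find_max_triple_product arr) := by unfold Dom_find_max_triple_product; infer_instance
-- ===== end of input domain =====

-- B replaces A's two running-selection scans with one sort plus direct indexing (objective: simpler); return value only.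


-- ===== PORT A =====
-- A's first loop body: the running (max_num, max_num2, max_num3) update.
def stepMax (st : Int × Int × Int) (x : Int) : Int × Int × Int :=
  if x > st.2.2 then
    if x > st.2.1 then
      if x > st.1 then (x, st.1, st.2.1) else (st.1, x, st.2.1)
    else (st.1, st.2.1, x)
  else st

-- A's second loop body: the running (min_num, min_num_2) update.
def stepMin (st : Int × Int) (x : Int) : Int × Int :=
  if x < st.2 then (if x < st.1 then (x, st.1) else (st.1, x)) else st

-- max()/min() of the empty slice raise in Python; those inputs are excluded by Pre_, the .getD 0 default is unreachable there.
def find_max_triple_product (arr : List Int) : Int × Int × Int :=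
  let pre3 := PySem.List.slice arr none (some 3)
  let max_num := (PySem.List.max? pre3 (fun x => x)).getD 0
  let max_num3 := (PySem.List.min? pre3 (fun x => x)).getD 0
  let max_num2 := pre3.sum - max_num3 - max_num
  let ms := (arr.drop 3).foldl stepMax (max_num, max_num2, max_num3)
  let pre2 := PySem.List.slice arr (some 0) (some 2)
  let min_num := (PySem.List.min? pre2 (fun x => x)).getD 0
  let min_num_2 := (PySem.List.max? pre2 (fun x => x)).getD 0
  let ns := (arr.drop 2).foldl stepMin (min_num, min_num_2)
  if ms.1 * ms.2.1 * ms.2.2 > ns.1 * ns.2 * ms.1 then ms else (ms.1, ns.2, ns.1)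

-- ===== PORT B =====
-- s[-1] etc. raise IndexError on lists shorter than 3; excluded by Pre_, so the pyGetD default is unreachable.
def find_max_triple_product_alt (arr : List Int) : Int × Int × Int :=
  let s := PySem.List.sorted arr (fun x => x)
  if PySem.List.pyGetD s (-1) 0 * PySem.List.pyGetD s (-2) 0 * PySem.List.pyGetD s (-3) 0 >
      PySem.List.pyGetD s 0 0 * PySem.List.pyGetD s 1 0 * PySem.List.pyGetD s (-1) 0 then
    (PySem.List.pyGetD s (-1) 0, PySem.List.pyGetD s (-2) 0, PySem.List.pyGetD s (-3) 0)
  else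
    (PySem.List.pyGetD s (-1) 0, PySem.List.pyGetD s 1 0, PySem.List.pyGetD s 0 0)

-- ===== PRECONDITION & SPEC =====
-- Pre_ excludes lists shorter than 3: on [] A raises ValueError, and on length-1/2 lists A returns
-- degenerate values built from its leftover initial state while B's sort-indexing raises IndexError.
def Pre_find_max_triple_product (arr : List Int) : Prop := 3 ≤ arr.length
instance (arr : List Int) : Decidable (Pre_find_max_triple_product arr) := by unfold Pre_find_max_triple_product; infer_instance
def pvWitness_find_max_triple_product : List Int := [1, 2, 3]

def Spec_find_max_triple_product (arr : List Int) (out : Int × Int × Int) : Prop := out = find_max_triple_product_alt arr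
instance (arr : List Int) (out : Int × Int × Int) : Decidable (Spec_find_max_triple_product arr out) := by unfold Spec_find_max_triple_product; infer_instance

-- ===== CLAIM (what is proved, stated in full; the proofs are below) =====
def Claim_equal_find_max_triple_product : Prop := ∀ (arr : List Int), Dom_find_max_triple_product arr → Pre_find_max_triple_product arr → Spec_find_max_triple_product arr (find_max_triple_product arr)

-- ===== LEMMAS AND PROOFS =====

-- Invariant of A's first loop: the state is the descending top-3 of the processed prefix.
def InvMax (p : List Int) : Int × Int × Int → Prop
  | (M, B, C) => B ≤ M ∧ C ≤ B ∧ ∃ rest : List Int, (∀ y ∈ rest, y ≤ C) ∧ p.Perm (rest ++ [C, B, M])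

-- Invariant of A's second loop: the state is the ascending bottom-2 of the processed prefix.
def InvMin (p : List Int) : Int × Int → Prop
  | (n1, n2) => n1 ≤ n2 ∧ ∃ rest : List Int, (∀ y ∈ rest, n2 ≤ y) ∧ p.Perm (n1 :: n2 :: rest)

lemma foldl_inv {σ : Type} (Inv : List Int → σ → Prop) (f : σ → Int → σ)
    (hstep : ∀ p st x, Inv p st → Inv (p ++ [x]) (f st x)) :
    ∀ (t p : List Int) (st : σ), Inv p st → Inv (p ++ t) (t.foldl f st) := by
  intro t
  induction t with
  | nil => intro p st h; simpa using h
  | cons x t ih =>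
      intro p st h
      have := ih (p ++ [x]) (f st x) (hstep p st x h)
      simpa using this

lemma invMax_step (p : List Int) (st : Int × Int × Int) (x : Int) (h : InvMax p st) :
    InvMax (p ++ [x]) (stepMax st x) := by
  obtain ⟨M, B, C⟩ := st
  obtain ⟨h1, h2, rest, hrest, hp⟩ := h
  have key : (p ++ [x]).Perm (rest ++ [C, B, M, x]) := by
    have := hp.append_right [x]
    simpa using this
  unfold stepMax
  dsimp only
  split_ifs with hx3 hx2 hx1 <;> simp only [InvMax] <;>
    [ (refine ⟨by omega, by omega, rest ++ [C], ?_, ?_⟩);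
      (refine ⟨by omega, by omega, rest ++ [C], ?_, ?_⟩);
      (refine ⟨by omega, by omega, rest ++ [C], ?_, ?_⟩);
      (refine ⟨h1, h2, rest ++ [x], ?_, ?_⟩) ] <;>
  · first
    | (intro y hy
       rcases List.mem_append.mp hy with h' | h'
       · exact le_trans (hrest y h') (by omega)
       · simp at h'; omega)
    | (refine key.trans ?_
       simp only [List.append_assoc, List.cons_append, List.nil_append]
       refine List.Perm.append_left rest ?_
       refine List.perm_iff_count.mpr fun y => ?_
       simp [List.count_cons]
       try (split_ifs <;> omega))

lemma invMin_step (p : List Int) (st : Int × Int) (x : Int) (h : InvMin p st) :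
    InvMin (p ++ [x]) (stepMin st x) := by
  obtain ⟨n1, n2⟩ := st
  obtain ⟨h1, rest, hrest, hp⟩ := h
  have key : (p ++ [x]).Perm (n1 :: n2 :: (rest ++ [x])) := by
    have := hp.append_right [x]
    simpa using this
  unfold stepMin
  dsimp only
  split_ifs with hx2 hx1 <;> simp only [InvMin] <;>
    [ (refine ⟨by omega, n2 :: rest, ?_, ?_⟩);
      (refine ⟨by omega, n2 :: rest, ?_, ?_⟩);
      (refine ⟨h1, rest ++ [x], ?_, ?_⟩) ] <;>
  · first
    | (intro y hy
       first
        | (rcases List.mem_cons.mp hy with h' | h'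
           · omega
           · exact le_trans (by omega) (hrest y h'))
        | (rcases List.mem_append.mp hy with h' | h'
           · exact hrest y h'
           · simp at h'; omega))
    | (refine key.trans ?_
       refine List.perm_iff_count.mpr fun y => ?_
       simp [List.count_cons]
       try (split_ifs <;> omega))

lemma invMax_init (a b c : Int) :
    InvMax [a, b, c] ((PySem.List.max? [a, b, c] (fun x => x)).getD 0,
      [a, b, c].sum - (PySem.List.min? [a, b, c] (fun x => x)).getD 0 - (PySem.List.max? [a, b, c] (fun x => x)).getD 0,
      (PySem.List.min? [a, b, c] (fun x => x)).getD 0) := by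
  by_cases h1 : a < b <;> by_cases h2 : b < c <;> by_cases h3 : a < c <;> by_cases h4 : c < a <;> by_cases h5 : c < b <;> by_cases h6 : b < a <;>
    simp only [InvMax, PySem.List.max?, PySem.List.min?, List.foldl, List.sum_cons, List.sum_nil, h1, h2, h3, h4, h5, h6,
      if_true, if_false, Option.getD_some] <;>
    first
      | omega
      | (refine ⟨by omega, by omega, [], by simp, ?_⟩
         refine List.perm_iff_count.mpr fun y => ?_
         simp [List.count_cons]
         try (split_ifs <;> omega))

lemma invMin_init (a b : Int) :
    InvMin [a, b] ((PySem.List.min? [a, b] (fun x => x)).getD 0,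
      (PySem.List.max? [a, b] (fun x => x)).getD 0) := by
  by_cases h1 : a < b <;> by_cases h2 : b < a <;>
    simp only [InvMin, PySem.List.max?, PySem.List.min?, List.foldl, h1, h2,
      if_true, if_false, Option.getD_some] <;>
    first
      | omega
      | (refine ⟨by omega, [], by simp, ?_⟩
         refine List.perm_iff_count.mpr fun y => ?_
         simp [List.count_cons]
         try (split_ifs <;> omega))

lemma invMax_sorted {p : List Int} {st : Int × Int × Int} (h : InvMax p st) :
    ∃ u : List Int, PySem.List.sorted p (fun x => x) = u ++ [st.2.2, st.2.1, st.1] := by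
  obtain ⟨M, B, C⟩ := st
  obtain ⟨h1, h2, rest, hrest, hp⟩ := h
  refine ⟨PySem.List.sorted rest (fun x => x), ?_⟩
  apply PySem.List.sorted_id_eq_of_perm_of_pairwise
  · exact ((PySem.List.sorted_perm rest (fun x => x) false).append_right [C, B, M]).trans hp.symm
  · refine List.pairwise_append.mpr ⟨?_, by simp; omega, ?_⟩
    · simpa using PySem.List.sorted_pairwise rest (fun x => x)
    · intro y hy z hz
      have : y ∈ rest := (PySem.List.mem_sorted _ _ _ _).mp hy
      have := hrest y this
      simp at hz
      rcases hz with rfl | rfl | rfl <;> omega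

lemma invMin_sorted {p : List Int} {st : Int × Int} (h : InvMin p st) :
    ∃ r : List Int, PySem.List.sorted p (fun x => x) = st.1 :: st.2 :: r := by
  obtain ⟨n1, n2⟩ := st
  obtain ⟨h1, rest, hrest, hp⟩ := h
  refine ⟨PySem.List.sorted rest (fun x => x), ?_⟩
  apply PySem.List.sorted_id_eq_of_perm_of_pairwise
  · exact (((PySem.List.sorted_perm rest (fun x => x) false).cons n2).cons n1).trans hp.symm
  · refine List.pairwise_cons.mpr ⟨?_, List.pairwise_cons.mpr ⟨?_, ?_⟩⟩
    · intro y hy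
      rcases List.mem_cons.mp hy with rfl | hy'
      · omega
      · exact le_trans h1 (hrest y ((PySem.List.mem_sorted _ _ _ _).mp hy'))
    · intro y hy
      exact hrest y ((PySem.List.mem_sorted _ _ _ _).mp hy)
    · simpa using PySem.List.sorted_pairwise rest (fun x => x)

lemma getD_last3_1 (u : List Int) (c b a : Int) : PySem.List.pyGetD (u ++ [c, b, a]) (-1) 0 = a := by
  have h : u ++ [c, b, a] = (u ++ [c, b]) ++ [a] := by simp
  rw [h, PySem.List.pyGetD_neg_one_append_singleton]

lemma getD_last3_2 (u : List Int) (c b a : Int) : PySem.List.pyGetD (u ++ [c, b, a]) (-2) 0 = b := by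
  rw [PySem.List.pyGetD_neg_ofNat (u ++ [c, b, a]) 2 0 (by omega) (by simp)]
  simp

lemma getD_last3_3 (u : List Int) (c b a : Int) : PySem.List.pyGetD (u ++ [c, b, a]) (-3) 0 = c := by
  rw [PySem.List.pyGetD_neg_ofNat (u ++ [c, b, a]) 3 0 (by omega) (by simp)]
  simp

lemma getD_first2_0 (n1 n2 : Int) (r : List Int) : PySem.List.pyGetD (n1 :: n2 :: r) 0 0 = n1 := by
  simp [PySem.List.pyGetD_zero_cons]

lemma getD_first2_1 (n1 n2 : Int) (r : List Int) : PySem.List.pyGetD (n1 :: n2 :: r) 1 0 = n2 := by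
  simp [pysem]

-- ===== VERDICT (by name: the statement is the Claim_ definition above) =====
set_option maxHeartbeats 1000000 in
theorem find_max_triple_product_spec : Claim_equal_find_max_triple_product := by
  intro arr _hdom hpre
  unfold Pre_find_max_triple_product at hpre
  rcases arr with _ | ⟨a, tl⟩
  · simp at hpre
  rcases tl with _ | ⟨b, tl⟩
  · simp at hpre
  rcases tl with _ | ⟨c, t⟩
  · simp at hpre
  have hpre3 : PySem.List.slice (a :: b :: c :: t) none (some 3) = [a, b, c] := by
    simp [pysem]
  have hpre2 : PySem.List.slice (a :: b :: c :: t) (some 0) (some 2) = [a, b] := by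
    simp [pysem]
  have hMax : InvMax (a :: b :: c :: t) (t.foldl stepMax
      ((PySem.List.max? [a, b, c] (fun x => x)).getD 0,
        [a, b, c].sum - (PySem.List.min? [a, b, c] (fun x => x)).getD 0 - (PySem.List.max? [a, b, c] (fun x => x)).getD 0,
        (PySem.List.min? [a, b, c] (fun x => x)).getD 0)) := by
    have := foldl_inv InvMax stepMax invMax_step t [a, b, c] _ (invMax_init a b c)
    simpa using this
  have hMin : InvMin (a :: b :: c :: t) ((c :: t).foldl stepMin
      ((PySem.List.min? [a, b] (fun x => x)).getD 0,
        (PySem.List.max? [a, b] (fun x => x)).getD 0)) := by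
    have := foldl_inv InvMin stepMin invMin_step (c :: t) [a, b] _ (invMin_init a b)
    simpa using this
  obtain ⟨u, hu⟩ := invMax_sorted hMax
  obtain ⟨r, hr⟩ := invMin_sorted hMin
  unfold Spec_find_max_triple_product find_max_triple_product find_max_triple_product_alt
  simp only [hpre3, hpre2, List.drop_succ_cons, List.drop_zero]
  simp only [hu, getD_last3_1, getD_last3_2, getD_last3_3]
  simp only [← hu]
  simp only [hr, getD_first2_0, getD_first2_1]
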